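-- pv_equiv track=rewrite | github.com/GivcBIManager/NovaSight | backend/app/middleware/request_logging.py | _sanitize_query_string
-- ===== SOURCE A (Python) =====
-- def _sanitize_query_string(query_string: str) -> str:
--     """Sanitize query string to remove sensitive parameters.
--
--     Args:
--         query_string: Raw query string
--
--     Returns:
--         Sanitized query string
--     """
--     if not query_string:
--         return query_string
--
--     sensitive_params = {'password', 'token', 'api_key', 'secret', 'auth'}
--
--     parts = []
--     for param in query_string.split('&'):
--         if '=' in param:
--             key, _ = param.split('=', 1)
--             if key.lower() in sensitive_params:
--                 parts.append(f'{key}=[REDACTED]')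
--             else:
--                 parts.append(param)
--         else:
--             parts.append(param)
--
--     return '&'.join(parts)
-- ===== SOURCE B (Python) =====
-- def _sanitize_query_string(query_string: str) -> str:
--     """Sanitize query string to remove sensitive parameters (single streaming pass)."""
--     sensitive_params = {'password', 'token', 'api_key', 'secret', 'auth'}
--     res = []
--     key = []
--     mode = 0  # 0: reading a key, 1: copying a value, 2: dropping a redacted value
--     for c in query_string:
--         if c == '&':
--             res += key
--             res.append('&')
--             key = []
--             mode = 0
--         elif mode == 0 and c == '=':
--             res += key
--             res.append('=')
--             if ''.join(key).lower() in sensitive_params: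
--                 res += '[REDACTED]'
--                 mode = 2
--             else:
--                 mode = 1
--             key = []
--         elif mode == 0:
--             key.append(c)
--         elif mode == 1:
--             res.append(c)
--     res += key
--     return ''.join(res)
-- ===== Notes on version B (the rewrite author's own statement) =====
-- stated objective: alternative
-- what changed: B replaces A's split('&') / per-param split('=',1) / '&'.join round-trip by a single streaming pass over the characters with a three-state machine (reading key / copying value / dropping redacted value), never materialising the parameter list.
import Mathlib
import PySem

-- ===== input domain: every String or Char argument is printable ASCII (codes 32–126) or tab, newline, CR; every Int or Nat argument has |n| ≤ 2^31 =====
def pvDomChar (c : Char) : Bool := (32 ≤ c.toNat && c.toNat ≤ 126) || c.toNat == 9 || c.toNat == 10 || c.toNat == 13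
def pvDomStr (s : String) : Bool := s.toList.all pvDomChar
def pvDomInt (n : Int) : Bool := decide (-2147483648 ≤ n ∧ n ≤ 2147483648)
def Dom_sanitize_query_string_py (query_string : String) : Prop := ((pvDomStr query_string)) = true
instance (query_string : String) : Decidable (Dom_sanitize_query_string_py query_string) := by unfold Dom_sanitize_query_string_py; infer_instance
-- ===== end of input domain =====

-- B replaces A's split('&') / per-param split('=',1) / '&'.join round-trip by a single
-- streaming character pass with a small state machine (objective: alternative; same asymptotic cost, no speed claim).

-- ===== PORT A =====
def sanitize_query_string_py (query_string : String) : String :=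
  if query_string = "" then query_string
  else
    let sensitive_params : PySem.Set String :=
      PySem.Set.ofList ["password", "token", "api_key", "secret", "auth"]
    let parts : List String :=
      ((PySem.Str.split? query_string "&").getD []).foldl (fun parts param =>
        if PySem.Str.isIn "=" param then
          -- key, _ = param.split('=', 1): under '=' in param this always yields 2 pieces
          let key := ((PySem.Str.splitMax? param "=" 1).getD []).headD ""
          if sensitive_params.contains (PySem.Str.lower key) then
            parts ++ [key ++ "=[REDACTED]"]
          else
            parts ++ [param]
        else
          parts ++ [param]) []
    PySem.Str.join "&" parts

-- ===== PORT B =====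
-- one step of B's state machine; state = (output chars, current key chars, mode 0/1/2)
def pvStepB (st : List Char × List Char × Nat) (c : Char) : List Char × List Char × Nat :=
  let (res, key, mode) := st
  if c = '&' then (res ++ key ++ ['&'], [], 0)
  else if mode = 0 ∧ c = '=' then
    let res' := res ++ key ++ ['=']
    if (PySem.Set.ofList ["password", "token", "api_key", "secret", "auth"]).contains
        (PySem.Str.lower (String.ofList key)) then
      (res' ++ "[REDACTED]".toList, [], 2)
    else (res', [], 1)
  else if mode = 0 then (res, key ++ [c], 0)
  else if mode = 1 then (res ++ [c], key, mode)
  else (res, key, mode)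

def sanitize_query_string_py_alt (query_string : String) : String :=
  let st := query_string.toList.foldl pvStepB ([], [], 0)
  String.ofList (st.1 ++ st.2.1)

-- ===== PRECONDITION & SPEC =====
def Spec_sanitize_query_string_py (query_string : String) (out : String) : Prop := out = sanitize_query_string_py_alt query_string
instance (query_string : String) (out : String) : Decidable (Spec_sanitize_query_string_py query_string out) := by unfold Spec_sanitize_query_string_py; infer_instance

-- ===== CLAIM (what is proved, stated in full; the proofs are below) =====
def Claim_equal_sanitize_query_string_py : Prop := ∀ (query_string : String), Dom_sanitize_query_string_py query_string → Spec_sanitize_query_string_py query_string (sanitize_query_string_py query_string)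

-- ===== LEMMAS AND PROOFS =====

-- the sensitivity test, on the list-of-chars level
def pvSens (k : List Char) : Bool :=
  (PySem.Set.ofList ["password", "token", "api_key", "secret", "auth"]).contains
    (PySem.Str.lower (String.ofList k))

-- A's per-parameter transformation, on the list level
def pvF (param : List Char) : List Char :=
  if '=' ∈ param then
    let k := param.takeWhile (· ≠ '=')
    if pvSens k then k ++ "=[REDACTED]".toList else param
  else param

-- split on '&' (structural version of Chars.splitOn · ['&'])
def pvSplit : List Char → List (List Char)
  | [] => [[]]
  | c :: t =>
    if c = '&' then [] :: pvSplit t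
    else
      match pvSplit t with
      | p :: ps => (c :: p) :: ps
      | [] => [[c]]

-- '&' :: f p for each remaining parameter
def pvTailJoin : List (List Char) → List Char
  | [] => []
  | p :: ps => '&' :: (pvF p ++ pvTailJoin ps)

-- direct recursive description of B's state machine (mode, current key, input)
def pvProc : Nat → List Char → List Char → List Char
  | _, key, [] => key
  | m, key, c :: t =>
    if c = '&' then key ++ '&' :: pvProc 0 [] t
    else if m = 0 ∧ c = '=' then
      (if pvSens key then key ++ '=' :: ("[REDACTED]".toList ++ pvProc 2 [] t)
       else key ++ '=' :: pvProc 1 [] t)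
    else if m = 0 then pvProc 0 (key ++ [c]) t
    else if m = 1 then c :: pvProc m key t
    else pvProc m key t

theorem pvSplit_ne_nil (cs : List Char) : pvSplit cs ≠ [] := by
  cases cs with
  | nil => simp [pvSplit]
  | cons c t =>
    simp only [pvSplit]
    split
    · simp
    · split <;> simp_all

-- B's fold only appends to the output component
theorem pvFold_shift (cs : List Char) : ∀ (res key : List Char) (m : Nat),
    cs.foldl pvStepB (res, key, m) =
      ((res ++ (cs.foldl pvStepB ([], key, m)).1,
        (cs.foldl pvStepB ([], key, m)).2)) := by
  induction cs with
  | nil => intro res key m; simp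
  | cons c t ih =>
    intro res key m
    simp only [List.foldl_cons]
    by_cases hc : c = '&'
    · simp only [pvStepB, hc, if_true, List.nil_append]
      rw [ih (res ++ key ++ ['&']) [] 0, ih (key ++ ['&']) [] 0]
      simp
    · by_cases hm : m = 0 ∧ c = '='
      · simp only [pvStepB, if_neg hc, if_pos hm, List.nil_append]
        by_cases hs : (PySem.Set.ofList ["password", "token", "api_key", "secret", "auth"]).contains
            (PySem.Str.lower (String.ofList key)) = true
        · simp only [hs, if_true]
          rw [ih (res ++ key ++ ['='] ++ "[REDACTED]".toList) [] 2,
              ih (key ++ ['='] ++ "[REDACTED]".toList) [] 2]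
          simp
        · simp only [if_neg hs]
          rw [ih (res ++ key ++ ['=']) [] 1, ih (key ++ ['=']) [] 1]
          simp
      · by_cases hm0 : m = 0
        · simp only [pvStepB, if_neg hc, if_neg hm, if_pos hm0, List.nil_append]
          exact ih res (key ++ [c]) 0
        · by_cases hm1 : m = 1
          · simp only [pvStepB, if_neg hc, if_neg hm, if_neg hm0, if_pos hm1, List.nil_append]
            rw [ih (res ++ [c]) key m, ih [c] key m]
            simp
          · simp only [pvStepB, if_neg hc, if_neg hm, if_neg hm0, if_neg hm1, List.nil_append]
            exact ih res key m

-- B's fold computes pvProc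
theorem pvFold_proc (cs : List Char) : ∀ (m : Nat) (key : List Char), m < 3 → (m ≠ 0 → key = []) →
    (cs.foldl pvStepB ([], key, m)).1 ++ (cs.foldl pvStepB ([], key, m)).2.1 = pvProc m key cs := by
  induction cs with
  | nil => intro m key _ _; simp [pvProc]
  | cons c t ih =>
    intro m key h3 h0
    simp only [List.foldl_cons]
    by_cases hc : c = '&'
    · subst hc
      simp only [pvStepB, if_true, reduceIte, List.nil_append]
      rw [pvFold_shift t (key ++ ['&']) [] 0]
      simp only [pvProc, if_true, reduceIte]
      rw [← ih 0 [] (by omega) (by simp)]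
      simp
    · by_cases hm : m = 0 ∧ c = '='
      · obtain ⟨hm0, hce⟩ := hm
        subst hm0; subst hce
        simp only [pvStepB, if_neg hc, List.nil_append, and_true, if_true, reduceIte]
        simp only [pvProc, if_neg hc, and_true, if_true, reduceIte, pvSens]
        by_cases hs : (PySem.Set.ofList ["password", "token", "api_key", "secret", "auth"]).contains
            (PySem.Str.lower (String.ofList key)) = true
        · simp only [hs, if_true]
          rw [pvFold_shift t (key ++ ['='] ++ "[REDACTED]".toList) [] 2]
          rw [← ih 2 [] (by omega) (by simp)]
          simp
        · simp only [if_neg hs]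
          rw [pvFold_shift t (key ++ ['=']) [] 1]
          rw [← ih 1 [] (by omega) (by simp)]
          simp
      · by_cases hm0 : m = 0
        · subst hm0
          have hce : ¬ c = '=' := fun h => hm ⟨rfl, h⟩
          simp only [pvStepB, if_neg hc, true_and, if_neg hce, if_true, reduceIte,
            List.nil_append]
          rw [ih 0 (key ++ [c]) (by omega) (by simp)]
          simp only [pvProc, if_neg hc, true_and, if_neg hce, if_true, reduceIte]
        · by_cases hm1 : m = 1
          · subst hm1
            have hk : key = [] := h0 (by omega)
            subst hk
            simp only [pvStepB, if_neg hc, if_neg hm, if_neg hm0, if_true, reduceIte,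
              List.nil_append]
            rw [pvFold_shift t [c] [] 1]
            have h := ih 1 [] (by omega) (by simp)
            simp only [pvProc, if_neg hc, if_neg hm, if_neg hm0, if_true, reduceIte]
            rw [← h]
            simp
          · have hm2 : m = 2 := by omega
            subst hm2
            have hk : key = [] := h0 (by omega)
            subst hk
            simp only [pvStepB, if_neg hc, if_neg hm, if_neg hm0, if_neg hm1, List.nil_append]
            rw [ih 2 [] (by omega) (by simp)]
            simp [pvProc, if_neg hc, if_neg hm, if_neg hm0, if_neg hm1]

-- one step of the fuel-based splitOn.go on the one-character separator '&'
theorem pvGoAmp_step (fuel : Nat) (c : Char) (rest cur : List Char) (acc : List (List Char)) :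
    PySem.Chars.splitOn.go ['&'] (fuel+1) (c :: rest) cur acc =
      (if c = '&' then PySem.Chars.splitOn.go ['&'] fuel rest [] (cur.reverse :: acc)
       else PySem.Chars.splitOn.go ['&'] fuel rest (c :: cur) acc) := by
  rw [PySem.Chars.splitOn.go.eq_def]
  simp only [List.isPrefixOf, Bool.and_true, List.length_cons]
  by_cases hc : c = '&'
  · simp [hc]
  · simp [hc]
    intro h
    exact absurd h.symm hc

-- fuel-based splitOn.go on '&' computes pvSplit
theorem pvSplitOn_go (l : List Char) : ∀ (fuel : Nat) (cur : List Char) (acc : List (List Char)),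
    l.length ≤ fuel →
    PySem.Chars.splitOn.go ['&'] fuel l cur acc =
      acc.reverse ++ (match pvSplit l with
        | p :: ps => (cur.reverse ++ p) :: ps
        | [] => []) := by
  induction l with
  | nil =>
    intro fuel cur acc _
    cases fuel with
    | zero => rw [PySem.Chars.splitOn.go.eq_def]; simp [pvSplit]
    | succ f => rw [PySem.Chars.splitOn.go.eq_def]; simp [pvSplit]
  | cons c rest ih =>
    intro fuel cur acc h
    cases fuel with
    | zero => simp at h
    | succ f =>
      rw [pvGoAmp_step]
      have hne := pvSplit_ne_nil rest
      by_cases hc : c = '&'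
      · subst hc
        rw [if_pos rfl, ih f [] (cur.reverse :: acc) (by simpa using h)]
        cases hsp : pvSplit rest with
        | nil => exact absurd hsp hne
        | cons p ps => simp [pvSplit, hsp]
      · rw [if_neg hc, ih f (c :: cur) acc (by simpa using h)]
        cases hsp : pvSplit rest with
        | nil => exact absurd hsp hne
        | cons p ps => simp [pvSplit, hsp, hc]

theorem pvSplitOn_eq (cs : List Char) : PySem.Chars.splitOn cs ['&'] = pvSplit cs := by
  rw [PySem.Chars.splitOn]
  rw [pvSplitOn_go cs (cs.length + 1) [] [] (by omega)]
  have hne := pvSplit_ne_nil cs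
  cases hsp : pvSplit cs with
  | nil => exact absurd hsp hne
  | cons p ps => simp

-- splitOnMax.go with maxsplit exhausted returns the rest as one piece
theorem pvSplitMax_go0 (fuel : Nat) (l cur : List Char) (acc : List (List Char)) :
    PySem.Chars.splitOnMax.go ['='] fuel 0 l cur acc = acc.reverse ++ [cur.reverse ++ l] := by
  cases fuel with
  | zero => rw [PySem.Chars.splitOnMax.go.eq_def]; simp
  | succ f =>
    cases l with
    | nil => rw [PySem.Chars.splitOnMax.go.eq_def]; simp
    | cons c rest => rw [PySem.Chars.splitOnMax.go.eq_def]; simp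

-- one step of splitOnMax.go on separator '=' with maxsplit still positive
theorem pvGoEq_step (fuel m : Nat) (c : Char) (rest cur : List Char) (acc : List (List Char)) :
    PySem.Chars.splitOnMax.go ['='] (fuel+1) (m+1) (c :: rest) cur acc =
      (if c = '=' then PySem.Chars.splitOnMax.go ['='] fuel m rest [] (cur.reverse :: acc)
       else PySem.Chars.splitOnMax.go ['='] fuel (m+1) rest (c :: cur) acc) := by
  rw [PySem.Chars.splitOnMax.go.eq_def]
  simp only [List.isPrefixOf, Bool.and_true, List.length_cons, Nat.succ_ne_zero, if_false,
    Nat.add_sub_cancel]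
  by_cases hc : c = '='
  · simp [hc]
  · simp [hc]
    intro h
    exact absurd h.symm hc

theorem pvSplitMax_go1 (l : List Char) : ∀ (fuel : Nat) (cur : List Char) (acc : List (List Char)),
    l.length ≤ fuel →
    PySem.Chars.splitOnMax.go ['='] fuel 1 l cur acc =
      acc.reverse ++ (if '=' ∈ l then
        [cur.reverse ++ l.takeWhile (· ≠ '='), ((l.dropWhile (· ≠ '=')).tail)]
      else [cur.reverse ++ l]) := by
  induction l with
  | nil =>
    intro fuel cur acc _
    cases fuel with
    | zero => rw [PySem.Chars.splitOnMax.go.eq_def]; simp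
    | succ f => rw [PySem.Chars.splitOnMax.go.eq_def]; simp
  | cons c rest ih =>
    intro fuel cur acc h
    cases fuel with
    | zero => simp at h
    | succ f =>
      rw [show (1 : Nat) = 0 + 1 from rfl, pvGoEq_step]
      by_cases hc : c = '='
      · subst hc
        rw [if_pos rfl, pvSplitMax_go0]
        simp
      · rw [if_neg hc, ih f (c :: cur) acc (by simpa using h)]
        by_cases hr : '=' ∈ rest
        · have : ('=' : Char) ∈ c :: rest := List.mem_cons_of_mem _ hr
          simp [hr, this, hc]
        · have : ¬ ('=' : Char) ∈ c :: rest := by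
            simp [List.mem_cons, hr]
            intro hcc
            exact absurd hcc.symm hc
          simp [hr, this]

theorem pvSplitMax_eq (cs : List Char) (h : '=' ∈ cs) :
    PySem.Chars.splitOnMax cs ['='] 1 =
      [cs.takeWhile (· ≠ '='), (cs.dropWhile (· ≠ '=')).tail] := by
  rw [PySem.Chars.splitOnMax]
  rw [if_neg (by norm_num)]
  rw [show ((1 : Int).toNat) = 1 from rfl]
  rw [pvSplitMax_go1 cs (cs.length + 1) [] [] (by omega)]
  simp [h]

theorem pvIsIn_eq (l : List Char) : PySem.Chars.isIn ['='] l = decide ('=' ∈ l) := by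
  by_cases h : '=' ∈ l
  · have hinf : ['='] <:+: l := by
      obtain ⟨s, t, rfl⟩ := List.append_of_mem h
      exact ⟨s, t, by simp⟩
    have := PySem.Chars.find_ne_neg_one_iff l ['='] |>.mpr hinf
    simp [PySem.Chars.isIn, bne_iff_ne, this, h]
  · have hninf : ¬ ['='] <:+: l := fun hinf => h (by
      have := hinf.sublist
      simpa using this.mem (by simp : ('=' : Char) ∈ ['=']))
    have := PySem.Chars.find_eq_neg_one_iff l ['='] |>.mpr hninf
    simp [PySem.Chars.isIn, this, h]

theorem pvTakeWhile_key (key q : List Char) (hk : ∀ c ∈ key, c ≠ '=') :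
    ((key ++ '=' :: q).takeWhile (fun x => x ≠ '=')) = key := by
  induction key with
  | nil => simp
  | cons a as ih =>
    have ha := hk a (by simp)
    have ih' := ih (fun c hc => hk c (by simp [hc]))
    simp only [List.cons_append, List.takeWhile_cons]
    simp [ha]
    simpa using ih'

theorem pvRedEq : "=[REDACTED]".toList = '=' :: "[REDACTED]".toList := by decide

-- the central correspondence: pvProc versus per-parameter map + join
theorem pvProc_join (cs : List Char) :
    (∀ (key p : List Char) (ps : List (List Char)), pvSplit cs = p :: ps →
        (∀ c ∈ key, c ≠ '&' ∧ c ≠ '=') →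
        pvProc 0 key cs = pvF (key ++ p) ++ pvTailJoin ps) ∧
    (∀ (p : List Char) (ps : List (List Char)), pvSplit cs = p :: ps →
        pvProc 1 [] cs = p ++ pvTailJoin ps) ∧
    (∀ (p : List Char) (ps : List (List Char)), pvSplit cs = p :: ps →
        pvProc 2 [] cs = pvTailJoin ps) := by
  induction cs with
  | nil =>
    refine ⟨?_, ?_, ?_⟩
    · intro key p ps hsp hkey
      rw [show pvSplit [] = [[]] from rfl] at hsp
      injection hsp with h1 h2
      subst h1; subst h2
      have hkm : ¬ ('=' : Char) ∈ key := fun h => (hkey _ h).2 rfl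
      simp [pvProc, pvF, pvTailJoin, hkm]
    · intro p ps hsp
      rw [show pvSplit [] = [[]] from rfl] at hsp
      injection hsp with h1 h2
      subst h1; subst h2
      simp [pvProc, pvTailJoin]
    · intro p ps hsp
      rw [show pvSplit [] = [[]] from rfl] at hsp
      injection hsp with h1 h2
      subst h1; subst h2
      simp [pvProc, pvTailJoin]
  | cons c t ih =>
    obtain ⟨ih0, ih1, ih2⟩ := ih
    have hne := pvSplit_ne_nil t
    obtain ⟨q, qs, hsp⟩ : ∃ q qs, pvSplit t = q :: qs := by
      cases hq : pvSplit t with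
      | nil => exact absurd hq hne
      | cons a b => exact ⟨a, b, rfl⟩
    refine ⟨?_, ?_, ?_⟩
    · intro key p ps hsp0 hkey
      by_cases hc : c = '&'
      · subst hc
        have hstep : pvSplit ('&' :: t) = [] :: q :: qs := by simp [pvSplit, hsp]
        rw [hstep] at hsp0
        injection hsp0 with h1 h2
        subst h1; subst h2
        have hkm : ¬ ('=' : Char) ∈ key := fun h => (hkey _ h).2 rfl
        have hA := ih0 [] q qs hsp (by simp)
        simp only [pvProc, if_true, reduceIte, hA, List.nil_append]
        simp [pvF, pvTailJoin, hkm]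
      · by_cases he : c = '='
        · subst he
          have hstep : pvSplit ('=' :: t) = ('=' :: q) :: qs := by simp [pvSplit, hsp, hc]
          rw [hstep] at hsp0
          injection hsp0 with h1 h2
          subst h1; subst h2
          have hkm : ∀ x ∈ key, x ≠ '=' := fun x hx => (hkey x hx).2
          have htw : ((key ++ '=' :: q).takeWhile (fun x => x ≠ '=')) = key :=
            pvTakeWhile_key key q hkm
          have hmem : ('=' : Char) ∈ key ++ '=' :: q := by simp
          simp only [pvProc, if_neg hc, true_and, if_true, reduceIte, pvF, hmem, htw]
          by_cases hs : pvSens key = true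
          · simp only [hs, if_true]
            rw [ih2 q qs hsp]
            simp [pvRedEq]
          · simp only [if_neg hs]
            rw [ih1 q qs hsp]
            simp
        · have hstep : pvSplit (c :: t) = (c :: q) :: qs := by simp [pvSplit, hsp, hc]
          rw [hstep] at hsp0
          injection hsp0 with h1 h2
          subst h1; subst h2
          have hkey' : ∀ x ∈ key ++ [c], x ≠ '&' ∧ x ≠ '=' := by
            intro x hx
            rcases List.mem_append.mp hx with hx | hx
            · exact hkey x hx
            · simp at hx; subst hx; exact ⟨hc, he⟩
          simp only [pvProc, if_neg hc, true_and, if_neg he, if_true, reduceIte]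
          rw [ih0 (key ++ [c]) q qs hsp hkey']
          simp
    · intro p ps hsp0
      by_cases hc : c = '&'
      · subst hc
        have hstep : pvSplit ('&' :: t) = [] :: q :: qs := by simp [pvSplit, hsp]
        rw [hstep] at hsp0
        injection hsp0 with h1 h2
        subst h1; subst h2
        have hA := ih0 [] q qs hsp (by simp)
        simp only [pvProc, if_true, reduceIte, hA, List.nil_append]
        simp [pvTailJoin]
      · have hstep : pvSplit (c :: t) = (c :: q) :: qs := by simp [pvSplit, hsp, hc]
        rw [hstep] at hsp0
        injection hsp0 with h1 h2
        subst h1; subst h2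
        simp only [pvProc, if_neg hc, if_true, reduceIte]
        rw [ih1 q qs hsp]
        simp
    · intro p ps hsp0
      by_cases hc : c = '&'
      · subst hc
        have hstep : pvSplit ('&' :: t) = [] :: q :: qs := by simp [pvSplit, hsp]
        rw [hstep] at hsp0
        injection hsp0 with h1 h2
        subst h1; subst h2
        have hA := ih0 [] q qs hsp (by simp)
        simp only [pvProc, if_true, reduceIte, hA, List.nil_append]
        simp [pvTailJoin]
      · have hstep : pvSplit (c :: t) = (c :: q) :: qs := by simp [pvSplit, hsp, hc]
        rw [hstep] at hsp0
        injection hsp0 with h1 h2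
        subst h1; subst h2
        simp only [pvProc, if_neg hc, if_true, reduceIte]
        exact ih2 q qs hsp

-- A's per-parameter transformation, on the String level
def pvGA (param : String) : String :=
  if PySem.Str.isIn "=" param then
    let key := ((PySem.Str.splitMax? param "=" 1).getD []).headD ""
    if (PySem.Set.ofList ["password", "token", "api_key", "secret", "auth"]).contains
        (PySem.Str.lower key) then
      key ++ "=[REDACTED]"
    else param
  else param

theorem pvFoldl_acc {α β : Type} (g : α → β) (l : List α) (f : List β → α → List β)
    (hf : ∀ acc x, f acc x = acc ++ [g x]) : ∀ acc, l.foldl f acc = acc ++ l.map g := by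
  induction l with
  | nil => intro acc; simp
  | cons x xs ih =>
    intro acc
    simp only [List.foldl_cons, List.map_cons, hf]
    rw [ih (acc ++ [g x])]
    simp

theorem pvGA_toList (param : String) : (pvGA param).toList = pvF param.toList := by
  by_cases h : '=' ∈ param.toList
  · obtain ⟨a, b, hx, ha, hb⟩ : ∃ a b, PySem.Str.splitMax? param "=" 1 = some [a, b] ∧
        a.toList = param.toList.takeWhile (fun x => x ≠ '=') ∧
        b.toList = (param.toList.dropWhile (fun x => x ≠ '=')).tail := by
      have hmap := PySem.Str.splitMax?_map param "=" 1
      rw [show ("=" : String).toList = ['='] from by decide] at hmap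
      rw [PySem.Chars.splitMax?, if_neg (by decide), pvSplitMax_eq param.toList h] at hmap
      cases hx : PySem.Str.splitMax? param "=" 1 with
      | none => rw [hx] at hmap; simp at hmap
      | some l =>
        rw [hx] at hmap
        simp only [Option.map_some, Option.some.injEq] at hmap
        cases l with
        | nil => simp at hmap
        | cons a bs =>
          cases bs with
          | nil => simp at hmap
          | cons b cs =>
            cases cs with
            | nil =>
              simp only [List.map_cons, List.map_nil, List.cons.injEq, and_true] at hmap
              exact ⟨a, b, rfl, hmap.1, hmap.2⟩
            | cons d ds => simp at hmap
    have hkey : ((PySem.Str.splitMax? param "=" 1).getD []).headD "" = a := by rw [hx]; rfl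
    have hisin : PySem.Str.isIn "=" param = true := by
      rw [PySem.Str.isIn_eq, show ("=" : String).toList = ['='] from by decide, pvIsIn_eq]
      simpa using h
    simp only [pvGA, pvF, hkey, hisin, if_pos h, if_true]
    have hsens : (PySem.Set.ofList ["password", "token", "api_key", "secret", "auth"]).contains
        (PySem.Str.lower a) = pvSens (param.toList.takeWhile (fun x => x ≠ '=')) := by
      rw [pvSens, ← ha, String.ofList_toList]
    by_cases hs : (PySem.Set.ofList ["password", "token", "api_key", "secret", "auth"]).contains
        (PySem.Str.lower a) = true
    · rw [if_pos hs, if_pos (hsens ▸ hs)]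
      simp [ha]
    · rw [if_neg hs, if_neg (hsens ▸ hs)]
  · have hisin : PySem.Str.isIn "=" param = false := by
      rw [PySem.Str.isIn_eq, show ("=" : String).toList = ['='] from by decide, pvIsIn_eq]
      simpa using h
    simp only [pvGA, pvF, hisin, if_neg h, Bool.false_eq_true, if_false]

theorem pvJoin_tail (ps : List (List Char)) : ∀ p,
    PySem.Chars.join ['&'] ((p :: ps).map pvF) = pvF p ++ pvTailJoin ps := by
  induction ps with
  | nil => intro p; simp [PySem.Chars.join_singleton, pvTailJoin]
  | cons q qs ih =>
    intro p
    simp only [List.map_cons] at *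
    rw [PySem.Chars.join_cons_cons, ih q]
    simp [pvTailJoin]

-- ===== VERDICT (by name: the statement is the Claim_ definition above) =====
theorem sanitize_query_string_py_spec : Claim_equal_sanitize_query_string_py := by
  unfold Claim_equal_sanitize_query_string_py
  intro q _
  unfold Spec_sanitize_query_string_py
  by_cases hq : q = ""
  · subst hq; decide
  · apply String.toList_inj.mp
    -- B side
    have hB : (sanitize_query_string_py_alt q).toList = pvProc 0 [] q.toList := by
      rw [sanitize_query_string_py_alt]
      simp only [String.toList_ofList]
      exact pvFold_proc q.toList 0 [] (by omega) (by simp)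
    -- A side
    obtain ⟨sp, hsp, hspl⟩ : ∃ sp, PySem.Str.split? q "&" = some sp ∧
        sp.map String.toList = pvSplit q.toList := by
      have hmap := PySem.Str.split?_map q "&"
      rw [show ("&" : String).toList = ['&'] from by decide] at hmap
      rw [PySem.Chars.split?] at hmap
      rw [if_neg (by decide)] at hmap
      rw [pvSplitOn_eq q.toList] at hmap
      cases hx : PySem.Str.split? q "&" with
      | none => rw [hx] at hmap; simp at hmap
      | some sp =>
        rw [hx] at hmap
        simp only [Option.map_some, Option.some.injEq] at hmap
        exact ⟨sp, rfl, hmap⟩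
    have hA : (sanitize_query_string_py q).toList =
        PySem.Chars.join ['&'] (pvSplit q.toList |>.map pvF) := by
      rw [sanitize_query_string_py]
      rw [if_neg hq]
      simp only [hsp, Option.getD_some]
      rw [pvFoldl_acc pvGA sp _ (by
        intro acc x
        simp only [pvGA]
        split_ifs <;> rfl) []]
      rw [PySem.Str.toList_join]
      rw [show ("&" : String).toList = ['&'] from by decide]
      congr 1
      rw [← hspl]
      simp only [List.nil_append, List.map_map]
      exact List.map_congr_left (fun x _ => pvGA_toList x)
    rw [hA, hB]
    obtain ⟨p, ps, hps⟩ : ∃ p ps, pvSplit q.toList = p :: ps := by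
      cases hx : pvSplit q.toList with
      | nil => exact absurd hx (pvSplit_ne_nil q.toList)
      | cons a b => exact ⟨a, b, rfl⟩
    rw [hps, pvJoin_tail ps p]
    rw [(pvProc_join q.toList).1 [] p ps hps (by simp)]
    simp
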